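-- pv_equiv track=rewrite | github.com/nicoceron/co-acc | scripts/parse_ungrd_public_evidence.py | build_network_summary
-- ===== SOURCE A (Python) =====
-- def build_network_summary(documents: list[dict[str, object]]) -> dict[str, object]:
--     reference_codes: set[str] = set()
--     nits: set[str] = set()
--     emails: set[str] = set()
--     organizations: set[str] = set()
--     named_people: set[str] = set()
--     for document in documents:
--         reference_codes.update(str(value) for value in (document.get("reference_codes") or []))
--         nits.update(str(value) for value in (document.get("nits") or []))
--         emails.update(str(value) for value in (document.get("emails") or []))
--         organizations.update(str(value) for value in (document.get("organizations") or []))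
--         named_people.update(str(value) for value in (document.get("named_people") or []))
--     return {
--         "reference_codes": sorted(reference_codes),
--         "nits": sorted(nits),
--         "emails": sorted(emails),
--         "organizations": sorted(organizations),
--         "named_people": sorted(named_people),
--     }
-- ===== SOURCE B (Python) =====
-- def build_network_summary(documents: list[dict[str, object]]) -> dict[str, object]:
--     summary = {}
--     for key in ("reference_codes", "nits", "emails", "organizations", "named_people"):
--         values = sorted(str(v) for doc in documents for v in (doc.get(key) or []))
--         unique = []
--         for v in values:
--             if not unique or unique[-1] != v:
--                 unique.append(v)
--         summary[key] = unique
--     return summary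
-- ===== Notes on version B (the rewrite author's own statement) =====
-- stated objective: alternative
-- what changed: Replaces A's five parallel hash-set accumulators (dedup-by-set, then sort) with a per-field sort of the raw duplicate-containing value list followed by an adjacent-comparison unique scan (sort-then-unique), building the result dict key by key.
import Mathlib
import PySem

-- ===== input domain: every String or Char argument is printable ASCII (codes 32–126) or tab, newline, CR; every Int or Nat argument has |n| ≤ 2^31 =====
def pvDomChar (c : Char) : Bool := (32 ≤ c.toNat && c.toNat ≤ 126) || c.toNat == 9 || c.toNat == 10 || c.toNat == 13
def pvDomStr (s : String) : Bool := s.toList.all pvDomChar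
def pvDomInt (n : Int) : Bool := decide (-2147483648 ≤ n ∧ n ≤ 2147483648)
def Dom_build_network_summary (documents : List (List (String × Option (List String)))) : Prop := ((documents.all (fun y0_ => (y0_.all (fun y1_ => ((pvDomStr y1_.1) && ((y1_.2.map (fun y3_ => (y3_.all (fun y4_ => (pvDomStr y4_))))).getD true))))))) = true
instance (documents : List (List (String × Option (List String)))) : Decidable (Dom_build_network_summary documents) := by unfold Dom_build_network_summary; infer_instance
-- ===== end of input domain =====

-- B replaces A's five parallel hash-set accumulators (dedup by set, then sort) with a
-- per-field sort of the raw duplicate-containing value list followed by an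
-- adjacent-comparison unique scan (sort-then-unique) (objective: alternative).

-- document.get(k) or []  (this exact expression appears in both Pythons)
def pvGetOrNil (doc : List (String × Option (List String))) (k : String) : List String :=
  ((PySem.Dict.get? (PySem.Dict.mk doc) k).getD none).getD []

-- ===== PORT A =====
def build_network_summary (documents : List (List (String × Option (List String)))) : List (String × List String) :=
  let st := documents.foldl
    (fun (st : PySem.Set String × PySem.Set String × PySem.Set String × PySem.Set String × PySem.Set String) doc =>
      (PySem.Set.update st.1 (pvGetOrNil doc "reference_codes"),
       PySem.Set.update st.2.1 (pvGetOrNil doc "nits"),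
       PySem.Set.update st.2.2.1 (pvGetOrNil doc "emails"),
       PySem.Set.update st.2.2.2.1 (pvGetOrNil doc "organizations"),
       PySem.Set.update st.2.2.2.2 (pvGetOrNil doc "named_people")))
    (PySem.Set.empty, PySem.Set.empty, PySem.Set.empty, PySem.Set.empty, PySem.Set.empty)
  [("reference_codes", PySem.List.sorted st.1 (fun x => x) false),
   ("nits", PySem.List.sorted st.2.1 (fun x => x) false),
   ("emails", PySem.List.sorted st.2.2.1 (fun x => x) false),
   ("organizations", PySem.List.sorted st.2.2.2.1 (fun x => x) false),
   ("named_people", PySem.List.sorted st.2.2.2.2 (fun x => x) false)]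

-- ===== PORT B =====
def pvFieldKeys : List String := ["reference_codes", "nits", "emails", "organizations", "named_people"]

-- the inner loop of Source B: adjacent-comparison unique scan over the sorted value list
-- ('if not unique or unique[-1] != v: unique.append(v)')
def pvUniqueScan (values : List String) : List String :=
  values.foldl
    (fun uniq v =>
      if uniq = [] ∨ PySem.List.pyGet? uniq (-1) ≠ some v then uniq ++ [v] else uniq) []

def build_network_summary_alt (documents : List (List (String × Option (List String)))) : List (String × List String) :=
  pvFieldKeys.foldl
    (fun summary key =>
      let values := PySem.List.sorted (documents.flatMap (fun doc => pvGetOrNil doc key)) (fun x => x) false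
      summary ++ [(key, pvUniqueScan values)]) []

-- ===== PRECONDITION & SPEC =====
def Spec_build_network_summary (documents : List (List (String × Option (List String)))) (out : List (String × List String)) : Prop := out = build_network_summary_alt documents
instance (documents : List (List (String × Option (List String)))) (out : List (String × List String)) : Decidable (Spec_build_network_summary documents out) := by unfold Spec_build_network_summary; infer_instance

-- ===== CLAIM (what is proved, stated in full; the proofs are below) =====
def Claim_equal_build_network_summary : Prop := ∀ (documents : List (List (String × Option (List String)))), Dom_build_network_summary documents → Spec_build_network_summary documents (build_network_summary documents)

-- ===== LEMMAS AND PROOFS =====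

-- A's single fold over the 5-tuple state computes, componentwise, five per-key folds.
theorem foldA_components (docs : List (List (String × Option (List String))))
    (s1 s2 s3 s4 s5 : PySem.Set String) :
    docs.foldl
      (fun (st : PySem.Set String × PySem.Set String × PySem.Set String × PySem.Set String × PySem.Set String) doc =>
        (PySem.Set.update st.1 (pvGetOrNil doc "reference_codes"),
         PySem.Set.update st.2.1 (pvGetOrNil doc "nits"),
         PySem.Set.update st.2.2.1 (pvGetOrNil doc "emails"),
         PySem.Set.update st.2.2.2.1 (pvGetOrNil doc "organizations"),
         PySem.Set.update st.2.2.2.2 (pvGetOrNil doc "named_people")))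
      (s1, s2, s3, s4, s5)
    = (docs.foldl (fun s doc => PySem.Set.update s (pvGetOrNil doc "reference_codes")) s1,
       docs.foldl (fun s doc => PySem.Set.update s (pvGetOrNil doc "nits")) s2,
       docs.foldl (fun s doc => PySem.Set.update s (pvGetOrNil doc "emails")) s3,
       docs.foldl (fun s doc => PySem.Set.update s (pvGetOrNil doc "organizations")) s4,
       docs.foldl (fun s doc => PySem.Set.update s (pvGetOrNil doc "named_people")) s5) := by
  induction docs generalizing s1 s2 s3 s4 s5 with
  | nil => rfl
  | cons d t ih => simp only [List.foldl_cons]; exact ih _ _ _ _ _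

-- chaining set.update: updating with each document's values is one update with the concatenation
theorem foldl_update_eq_update_flatMap (docs : List (List (String × Option (List String))))
    (v : List (String × Option (List String)) → List String) (s0 : PySem.Set String) :
    docs.foldl (fun s d => PySem.Set.update s (v d)) s0
      = PySem.Set.update s0 (docs.flatMap v) := by
  induction docs generalizing s0 with
  | nil => rfl
  | cons d t ih =>
    rw [List.foldl_cons, ih, List.flatMap_cons]
    simp only [PySem.Set.update, List.foldl_append]

-- every member of a strictly increasing list is ≤ its last element
theorem mem_le_getLast : ∀ (acc : List String) (l a : String),
    acc.Pairwise (· < ·) → acc.getLast? = some l → a ∈ acc → a ≤ l := by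
  intro acc
  induction acc with
  | nil => intro l a _ h; simp at h
  | cons x t ih =>
    intro l a hp hl ha
    cases t with
    | nil =>
      simp at hl ha; subst hl; subst ha; exact le_refl _
    | cons y u =>
      rw [List.getLast?_cons_cons] at hl
      rcases List.mem_cons.mp ha with rfl | hat
      · have hlmem : l ∈ y :: u := List.mem_of_getLast? hl
        exact le_of_lt ((List.pairwise_cons.mp hp).1 l hlmem)
      · exact ih l a (List.pairwise_cons.mp hp).2 hl hat

-- the unique-scan loop invariant: on a ≤-sorted input it produces a strictly
-- increasing list with exactly the members of accumulator and input
theorem uniqueScan_invariant : ∀ (L acc : List String),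
    acc.Pairwise (· < ·) → L.Pairwise (· ≤ ·) → (∀ a ∈ acc, ∀ b ∈ L, a ≤ b) →
    (L.foldl (fun uniq v =>
        if uniq = [] ∨ PySem.List.pyGet? uniq (-1) ≠ some v then uniq ++ [v] else uniq) acc).Pairwise (· < ·)
    ∧ ∀ x, x ∈ L.foldl (fun uniq v =>
        if uniq = [] ∨ PySem.List.pyGet? uniq (-1) ≠ some v then uniq ++ [v] else uniq) acc
        ↔ x ∈ acc ∨ x ∈ L := by
  intro L
  induction L with
  | nil => intro acc hacc _ _; exact ⟨hacc, by simp⟩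
  | cons v t ih =>
    intro acc hacc hL hle
    simp only [List.foldl_cons]
    by_cases h : acc.getLast? = some v
    · -- v equals the last accumulated element: skip, v is already in acc
      have hne : acc ≠ [] := by intro he; rw [he] at h; simp at h
      rw [if_neg (by simp [PySem.List.pyGet?_neg_one, hne, h])]
      have hvmem : v ∈ acc := List.mem_of_getLast? h
      obtain ⟨hp, hm⟩ := ih acc hacc (List.pairwise_cons.mp hL).2
        (fun a ha b hb => hle a ha b (List.mem_cons_of_mem _ hb))
      refine ⟨hp, fun x => ?_⟩
      rw [hm x]
      constructor
      · rintro (hx | hx)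
        · exact Or.inl hx
        · exact Or.inr (List.mem_cons_of_mem _ hx)
      · rintro (hx | hx)
        · exact Or.inl hx
        · rcases List.mem_cons.mp hx with rfl | hx
          · exact Or.inl hvmem
          · exact Or.inr hx
    · -- append v
      rw [if_pos (Or.inr (by rw [PySem.List.pyGet?_neg_one]; exact h))]
      have hlt : ∀ a ∈ acc, a < v := by
        intro a ha
        have hne : acc ≠ [] := by intro he; rw [he] at ha; simp at ha
        obtain ⟨l, hl⟩ := List.getLast?_isSome.mpr hne |> Option.isSome_iff_exists.mp
        have h1 : a ≤ l := mem_le_getLast acc l a hacc hl ha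
        have h2 : l ≤ v := hle l (List.mem_of_getLast? hl) v (List.mem_cons_self)
        have h3 : l ≠ v := fun he => h (he ▸ hl)
        exact lt_of_le_of_lt h1 (lt_of_le_of_ne h2 h3)
      have hacc' : (acc ++ [v]).Pairwise (· < ·) := by
        rw [List.pairwise_append]
        exact ⟨hacc, by simp, by simpa using hlt⟩
      have hle' : ∀ a ∈ acc ++ [v], ∀ b ∈ t, a ≤ b := by
        intro a ha b hb
        rcases List.mem_append.mp ha with ha | ha
        · exact hle a ha b (List.mem_cons_of_mem _ hb)
        · simp at ha; subst ha
          exact (List.pairwise_cons.mp hL).1 b hb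
      obtain ⟨hp, hm⟩ := ih (acc ++ [v]) hacc' (List.pairwise_cons.mp hL).2 hle'
      refine ⟨hp, fun x => ?_⟩
      rw [hm x]
      simp only [List.mem_append, List.mem_cons]
      tauto

-- the heart of the equivalence: sorting the deduplicated set equals
-- unique-scanning the sorted duplicate-containing list
theorem sorted_ofList_eq_uniqueScan_sorted (V : List String) :
    PySem.List.sorted (PySem.Set.ofList V) (fun x => x) false
      = pvUniqueScan (PySem.List.sorted V (fun x => x) false) := by
  have hs : (PySem.List.sorted V (fun x => x) false).Pairwise (· ≤ ·) :=
    PySem.List.sorted_pairwise V (fun x => x)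
  obtain ⟨hlt, hmem⟩ := uniqueScan_invariant (PySem.List.sorted V (fun x => x) false) []
    (by simp) hs (by simp)
  apply PySem.List.sorted_eq_of_perm_of_pairwise_lt
  · apply (List.perm_ext_iff_of_nodup (hlt.imp ne_of_lt) (PySem.Set.nodup_ofList V)).mpr
    intro x
    rw [hmem x]
    simp [PySem.List.mem_sorted, PySem.Set.mem_ofList]
  · exact hlt

-- per key: A's per-key set fold, sorted, equals B's sort-then-unique
theorem key_component_eq (documents : List (List (String × Option (List String)))) (k : String) :
    PySem.List.sorted
      (documents.foldl (fun s doc => PySem.Set.update s (pvGetOrNil doc k)) PySem.Set.empty)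
      (fun x => x) false
    = pvUniqueScan
        (PySem.List.sorted (documents.flatMap (fun doc => pvGetOrNil doc k)) (fun x => x) false) := by
  rw [foldl_update_eq_update_flatMap]
  exact sorted_ofList_eq_uniqueScan_sorted _

-- ===== VERDICT (by name: the statement is the Claim_ definition above) =====
theorem build_network_summary_spec : Claim_equal_build_network_summary := by
  intro documents _
  unfold Spec_build_network_summary build_network_summary build_network_summary_alt pvFieldKeys
  rw [foldA_components]
  simp only [List.foldl_cons, List.foldl_nil, List.nil_append, List.append_assoc]
  simp only [key_component_eq]
  rfl
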